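-- pv_equiv track=rewrite | github.com/nxnode/Code-Challenges | code_challenges/code_wars/directions_reduction.py | directions_reduction
-- ===== SOURCE A (Python) =====
-- def directions_reduction(directions):
--     reduced_directions = []
--     direction_ref = {"NORTH": "SOUTH", "SOUTH": "NORTH", "EAST": "WEST", "WEST": "EAST"}
--     for direction in directions:
--         try:
--             prev_direction = reduced_directions[-1]
--         except IndexError:
--             prev_direction = None
--         if direction_ref[direction] != prev_direction:
--             reduced_directions.append(direction)
--         else:
--             reduced_directions.pop()
--     return reduced_directions
-- ===== SOURCE B (Python) =====
-- def directions_reduction(directions):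
--     direction_ref = {"NORTH": "SOUTH", "SOUTH": "NORTH", "EAST": "WEST", "WEST": "EAST"}
--     ds = list(directions)
--     while True:
--         for i in range(len(ds) - 1):
--             if direction_ref[ds[i]] == ds[i + 1]:
--                 del ds[i:i + 2]
--                 break
--         else:
--             return ds
-- ===== Notes on version B (the rewrite author's own statement) =====
-- stated objective: alternative
-- what changed: Replaces the one-pass stack (append/pop against the last kept element) by fixed-point rewriting: repeatedly scan for the first adjacent opposite pair, delete it, and restart until a full scan finds none.
import Mathlib
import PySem

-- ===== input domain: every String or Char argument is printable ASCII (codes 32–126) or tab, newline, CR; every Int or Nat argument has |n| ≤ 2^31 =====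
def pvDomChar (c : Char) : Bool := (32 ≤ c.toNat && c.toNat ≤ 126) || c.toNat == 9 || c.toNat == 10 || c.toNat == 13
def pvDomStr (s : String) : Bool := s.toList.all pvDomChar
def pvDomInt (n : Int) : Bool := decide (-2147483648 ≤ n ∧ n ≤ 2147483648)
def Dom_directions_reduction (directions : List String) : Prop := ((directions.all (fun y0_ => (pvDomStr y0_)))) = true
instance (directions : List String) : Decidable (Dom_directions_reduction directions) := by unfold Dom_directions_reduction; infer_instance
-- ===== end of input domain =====

-- B replaces A's one-pass stack by fixed-point deletion of the first adjacent opposite pair (alternative decomposition, not faster).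

-- ===== PORT A =====
def drefA : PySem.Dict String String :=
  PySem.Dict.ofList [("NORTH", "SOUTH"), ("SOUTH", "NORTH"), ("EAST", "WEST"), ("WEST", "EAST")]

def directions_reduction (directions : List String) : List String :=
  directions.foldl (fun reduced direction =>
    let prev : Option String := PySem.List.pyGet? reduced (-1)
    if drefA.get? direction ≠ prev then reduced ++ [direction] else reduced.dropLast) []

-- ===== PORT B =====
def drefB : PySem.Dict String String :=
  PySem.Dict.ofList [("NORTH", "SOUTH"), ("SOUTH", "NORTH"), ("EAST", "WEST"), ("WEST", "EAST")]

-- the inner for-scan: delete the first adjacent pair (ds[i], ds[i+1]) with direction_ref[ds[i]] == ds[i+1]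
def scanB : List String → Option (List String)
  | x :: y :: t => if drefB.get? x = some y then some t else (scanB (y :: t)).map (x :: ·)
  | _ => none

theorem scanB_length : ∀ (ds ds' : List String), scanB ds = some ds' → ds'.length < ds.length := by
  intro ds
  induction ds with
  | nil => intro ds' hs; simp [scanB] at hs
  | cons x t ih =>
    intro ds' h
    cases t with
    | nil => simp [scanB] at h
    | cons y t' =>
      simp only [scanB] at h
      split at h
      · cases h; simp
      · simp only [Option.map_eq_some_iff] at h
        obtain ⟨a, ha, rfl⟩ := h
        have := ih a ha
        simpa using Nat.succ_lt_succ this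

-- the outer while-loop: repeat until a full scan finds no pair
def bloopB (ds : List String) : List String :=
  match h : scanB ds with
  | some ds' => bloopB ds'
  | none => ds
termination_by ds.length
decreasing_by exact scanB_length _ _ h

def directions_reduction_alt (directions : List String) : List String := bloopB directions

-- ===== PRECONDITION & SPEC =====
-- Pre_ excludes exactly the inputs on which A raises KeyError: any element outside the four direction keys.
def Pre_directions_reduction (directions : List String) : Prop :=
  ∀ x ∈ directions, x ∈ (["NORTH", "SOUTH", "EAST", "WEST"] : List String)
instance (directions : List String) : Decidable (Pre_directions_reduction directions) := by
  unfold Pre_directions_reduction; infer_instance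

def pvWitness_directions_reduction : List String := ["NORTH", "WEST", "SOUTH", "EAST", "EAST"]

def Spec_directions_reduction (directions : List String) (out : List String) : Prop :=
  out = directions_reduction_alt directions
instance (directions : List String) (out : List String) : Decidable (Spec_directions_reduction directions out) := by
  unfold Spec_directions_reduction; infer_instance

-- ===== CLAIM (what is proved, stated in full; the proofs are below) =====
def Claim_equal_directions_reduction : Prop :=
  ∀ (directions : List String), Dom_directions_reduction directions →
    Pre_directions_reduction directions →
    Spec_directions_reduction directions (directions_reduction directions)

-- ===== LEMMAS AND PROOFS =====

-- proof-level vocabulary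
def pvOpp (s : String) : String :=
  if s = "NORTH" then "SOUTH" else if s = "SOUTH" then "NORTH"
  else if s = "EAST" then "WEST" else if s = "WEST" then "EAST" else ""

def pvValidL (l : List String) : Prop := ∀ x ∈ l, x ∈ (["NORTH", "SOUTH", "EAST", "WEST"] : List String)

-- "reduced": no adjacent opposite pair
def pvRed : List String → Prop
  | x :: y :: t => y ≠ pvOpp x ∧ pvRed (y :: t)
  | _ => True

-- A's loop body
def pvStep (reduced : List String) (direction : String) : List String :=
  if drefA.get? direction ≠ PySem.List.pyGet? reduced (-1) then reduced ++ [direction] else reduced.dropLast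

theorem pvStep_foldl (directions : List String) :
    directions_reduction directions = directions.foldl pvStep [] := rfl

theorem pvOpp_opp {s : String} (h : s ∈ (["NORTH", "SOUTH", "EAST", "WEST"] : List String)) :
    pvOpp (pvOpp s) = s := by
  fin_cases h <;> rfl

theorem pvOpp_mem {s : String} (h : s ∈ (["NORTH", "SOUTH", "EAST", "WEST"] : List String)) :
    pvOpp s ∈ (["NORTH", "SOUTH", "EAST", "WEST"] : List String) := by
  fin_cases h <;> decide

theorem drefA_get {s : String} (h : s ∈ (["NORTH", "SOUTH", "EAST", "WEST"] : List String)) :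
    drefA.get? s = some (pvOpp s) := by
  fin_cases h <;> rfl

theorem drefB_get {s : String} (h : s ∈ (["NORTH", "SOUTH", "EAST", "WEST"] : List String)) :
    drefB.get? s = some (pvOpp s) := by
  fin_cases h <;> rfl

-- pvStep in pvOpp form, on valid directions
theorem pvStep_eq {acc : List String} {d : String}
    (hd : d ∈ (["NORTH", "SOUTH", "EAST", "WEST"] : List String)) :
    pvStep acc d = if acc.getLast? = some (pvOpp d) then acc.dropLast else acc ++ [d] := by
  unfold pvStep
  rw [drefA_get hd, PySem.List.pyGet?_neg_one]
  by_cases h : acc.getLast? = some (pvOpp d)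
  · rw [if_neg (by simp [h]), if_pos h]
  · rw [if_pos (fun e => h e.symm), if_neg h]

theorem pvRed_tail {x : String} {l : List String} (h : pvRed (x :: l)) : pvRed l := by
  cases l with
  | nil => trivial
  | cons y t => exact h.2

theorem pvRed_dropLast : ∀ {l : List String}, pvRed l → pvRed l.dropLast := by
  intro l
  induction l with
  | nil => intro; trivial
  | cons x t ih =>
    intro h
    cases t with
    | nil => trivial
    | cons y t' =>
      cases t' with
      | nil => trivial
      | cons z t'' =>
        refine ⟨h.1, ?_⟩
        exact ih h.2

theorem pvRed_append_singleton {l : List String} {d : String}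
    (hl : pvRed l) (h : ∀ p, l.getLast? = some p → d ≠ pvOpp p) : pvRed (l ++ [d]) := by
  induction l with
  | nil => trivial
  | cons x t ih =>
    cases t with
    | nil =>
      exact ⟨h x rfl, trivial⟩
    | cons y t' =>
      refine ⟨hl.1, ?_⟩
      exact ih hl.2 (fun p hp => h p (by simpa using hp))

theorem pvValid_step {acc : List String} {d : String} (hacc : pvValidL acc)
    (hd : d ∈ (["NORTH", "SOUTH", "EAST", "WEST"] : List String)) : pvValidL (pvStep acc d) := by
  rw [pvStep_eq hd]
  split
  · intro x hx; exact hacc x (List.dropLast_subset _ hx)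
  · intro x hx
    rcases List.mem_append.1 hx with h | h
    · exact hacc x h
    · simp at h; subst h; exact hd

theorem pvRed_step {acc : List String} {d : String} (hacc : pvValidL acc) (hred : pvRed acc)
    (hd : d ∈ (["NORTH", "SOUTH", "EAST", "WEST"] : List String)) : pvRed (pvStep acc d) := by
  rw [pvStep_eq hd]
  split
  · exact pvRed_dropLast hred
  · rename_i hne
    refine pvRed_append_singleton hred (fun p hp hdp => hne ?_)
    rw [hp, hdp, pvOpp_opp (hacc p (List.mem_of_getLast? hp))]

-- pushing x then opp x is the identity on a reduced valid stack
theorem pvRed_no_adj {pre : List String} {x : String} {t : List String} :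
    ¬ pvRed (pre ++ x :: pvOpp x :: t) := by
  induction pre with
  | nil => intro hr; exact hr.1 rfl
  | cons z zs ihz =>
    intro hr
    exact ihz (pvRed_tail hr)

-- pushing x then opp x is the identity on a reduced valid stack
theorem pvStep_cancel {acc : List String} {x : String} (hacc : pvValidL acc) (hred : pvRed acc)
    (hx : x ∈ (["NORTH", "SOUTH", "EAST", "WEST"] : List String)) :
    pvStep (pvStep acc x) (pvOpp x) = acc := by
  rw [pvStep_eq hx]
  by_cases h : acc.getLast? = some (pvOpp x)
  · rw [if_pos h, pvStep_eq (pvOpp_mem hx), pvOpp_opp hx]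
    rcases List.eq_nil_or_concat acc with rfl | ⟨a', p, hacc'⟩
    · simp at h
    · subst hacc'
      simp only [List.concat_eq_append] at h hred ⊢
      have hp : p = pvOpp x := by simpa using h
      subst hp
      simp only [List.dropLast_concat]
      have hne : a'.getLast? ≠ some x := by
        intro hlast
        rcases List.eq_nil_or_concat a' with rfl | ⟨a'', q, ha''⟩
        · simp at hlast
        · subst ha''
          simp only [List.concat_eq_append] at hlast hred
          have hq : q = x := by simpa using hlast
          rw [hq] at hred
          exact pvRed_no_adj (pre := a'') (x := x) (t := [])
            (by simpa using hred)
      rw [if_neg hne]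
  · rw [if_neg h, pvStep_eq (pvOpp_mem hx), pvOpp_opp hx]
    rw [if_pos (by simp), List.dropLast_concat]

theorem pvScanB_subset : ∀ {ds ds' : List String}, scanB ds = some ds' → ∀ x ∈ ds', x ∈ ds := by
  intro ds
  induction ds with
  | nil => intro ds' h; simp [scanB] at h
  | cons a t ih =>
    intro ds' h
    cases t with
    | nil => simp [scanB] at h
    | cons y t' =>
      simp only [scanB] at h
      split at h
      · cases h
        intro x hx
        exact List.mem_cons_of_mem _ (List.mem_cons_of_mem _ hx)
      · simp only [Option.map_eq_some_iff] at h
        obtain ⟨r, hr, rfl⟩ := h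
        intro x hx
        rcases List.mem_cons.mp hx with rfl | hx2
        · simp
        · exact List.mem_cons_of_mem _ (ih hr x hx2)

-- deleting the first adjacent opposite pair does not change the stack result
theorem pvScanB_foldl : ∀ {ds ds' : List String} {acc : List String},
    pvValidL ds → pvValidL acc → pvRed acc → scanB ds = some ds' →
    ds.foldl pvStep acc = ds'.foldl pvStep acc := by
  intro ds
  induction ds with
  | nil => intro ds' acc _ _ _ h; simp [scanB] at h
  | cons a t ih =>
    intro ds' acc hv hva hred h
    cases t with
    | nil => simp [scanB] at h
    | cons y t' =>
      have ha : a ∈ (["NORTH", "SOUTH", "EAST", "WEST"] : List String) := hv a (by simp)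
      simp only [scanB] at h
      split at h
      · rename_i hcancel
        cases h
        have hy : y = pvOpp a := by
          rw [drefB_get ha] at hcancel
          exact (Option.some_injective _ hcancel.symm)
        subst hy
        simp only [List.foldl_cons]
        rw [pvStep_cancel hva hred ha]
      · simp only [Option.map_eq_some_iff] at h
        obtain ⟨r, hr, rfl⟩ := h
        simp only [List.foldl_cons]
        exact ih (fun x hx => hv x (List.mem_cons_of_mem a hx))
          (pvValid_step hva ha) (pvRed_step hva hred ha) hr

-- a list on which the scan finds nothing is reduced
theorem pvScanB_none_red : ∀ {ds : List String}, pvValidL ds → scanB ds = none → pvRed ds := by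
  intro ds
  induction ds with
  | nil => intro _ _; trivial
  | cons a t ih =>
    intro hv h
    cases t with
    | nil => trivial
    | cons y t' =>
      have ha : a ∈ (["NORTH", "SOUTH", "EAST", "WEST"] : List String) := hv a (by simp)
      simp only [scanB] at h
      split at h
      · cases h
      · rename_i hne
        rw [drefB_get ha] at hne
        refine ⟨fun hy => hne (by rw [hy]), ?_⟩
        simp only [Option.map_eq_none_iff] at h
        exact ih (fun x hx => hv x (List.mem_cons_of_mem a hx)) h

-- in a reduced list, no element is followed by its opposite
theorem pvRed_head_of_append : ∀ (pre : List String) {x y : String} {t : List String},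
    pvRed (pre ++ x :: y :: t) → y ≠ pvOpp x := by
  intro pre
  induction pre with
  | nil => intro x y t h; exact h.1
  | cons z zs ih => intro x y t h; exact ih (pvRed_tail h)

-- the stack leaves a jointly-reduced list unchanged
theorem pvFoldl_red : ∀ {r acc : List String}, pvValidL r → pvValidL acc →
    pvRed (acc ++ r) → r.foldl pvStep acc = acc ++ r := by
  intro r
  induction r with
  | nil => intro acc _ _ _; simp
  | cons a t ih =>
    intro acc hv hva hred
    have ha : a ∈ (["NORTH", "SOUTH", "EAST", "WEST"] : List String) := hv a (by simp)
    have hstep : pvStep acc a = acc ++ [a] := by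
      rw [pvStep_eq ha]
      rcases List.eq_nil_or_concat acc with rfl | ⟨a', p, hacc'⟩
      · simp
      · subst hacc'
        simp only [List.concat_eq_append] at hred ⊢
        have hadj : a ≠ pvOpp p := by
          refine pvRed_head_of_append a' (y := a) (t := t) ?_
          simpa using hred
        rw [if_neg ?_]
        intro hl
        have hpa : p = pvOpp a := by simpa using hl
        apply hadj
        rw [hpa, pvOpp_opp ha]
    have hva' : pvValidL (acc ++ [a]) := by
      intro x hx
      rcases List.mem_append.mp hx with h1 | h1
      · exact hva x h1
      · simp at h1; subst h1; exact ha
    rw [List.foldl_cons, hstep,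
      ih (fun x hx => hv x (List.mem_cons_of_mem a hx)) hva' (by simpa using hred)]
    simp

theorem bloopB_some {ds ds' : List String} (h : scanB ds = some ds') : bloopB ds = bloopB ds' := by
  rw [bloopB]
  split
  · rename_i r hr; rw [h] at hr; cases hr; rfl
  · rename_i hr; rw [h] at hr; cases hr

theorem bloopB_none {ds : List String} (h : scanB ds = none) : bloopB ds = ds := by
  rw [bloopB]
  split
  · rename_i r hr; rw [h] at hr; cases hr
  · rfl

theorem pvBloop_eq : ∀ (ds : List String), pvValidL ds → ds.foldl pvStep [] = bloopB ds := by
  intro ds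
  induction ds using bloopB.induct with
  | case1 ds ds' hscan ih =>
    intro hv
    have hv' : pvValidL ds' := fun x hx => hv x (pvScanB_subset hscan x hx)
    rw [pvScanB_foldl (acc := ([] : List String)) hv
        (by intro x hx; simp at hx) (by trivial) hscan,
      ih hv', bloopB_some hscan]
  | case2 ds hscan =>
    intro hv
    rw [pvFoldl_red hv (by intro x hx; simp at hx)
        (by simpa using pvScanB_none_red hv hscan),
      bloopB_none hscan]
    simp

-- ===== VERDICT (by name: the statement is the Claim_ definition above) =====
theorem directions_reduction_spec : Claim_equal_directions_reduction := by
  intro directions _ hpre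
  unfold Spec_directions_reduction directions_reduction_alt
  rw [pvStep_foldl]
  exact pvBloop_eq directions hpre
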